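-- pv_equiv track=rewrite | github.com/nkossally/image-encrypter-backend | utilities.py | convert_byte_arr_to_byte_matrices
-- ===== SOURCE A (Python) =====
-- SIXTEEN = 16
--
-- FOUR = 4
--
-- def convert_byte_arr_to_byte_matrices(byte_arr):
--
--     while len(byte_arr) % SIXTEEN != 0:
--         byte_arr.append(0)
--
--     def to_chunks_of_four(arr):
--         return [arr[i:i + FOUR] for i in range(0, len(arr), FOUR)]
--
--     matrix =  to_chunks_of_four(byte_arr)
--     matrices = to_chunks_of_four(matrix)
--
--     return matrices
-- ===== SOURCE B (Python) =====
-- SIXTEEN = 16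
--
-- FOUR = 4
--
--
-- def convert_byte_arr_to_byte_matrices(byte_arr):
--     # pad in place to a multiple of 16 (same mutation as A, done in one extend)
--     byte_arr.extend([0] * (-len(byte_arr) % SIXTEEN))
--     # single pass with accumulators: collect bytes into a row, rows into a
--     # matrix, matrices into the result -- no slicing, no staged chunking
--     matrices = []
--     matrix = []
--     row = []
--     for x in byte_arr:
--         row.append(x)
--         if len(row) == FOUR:
--             matrix.append(row)
--             row = []
--             if len(matrix) == FOUR:
--                 matrices.append(matrix)
--                 matrix = []
--     return matrices
-- ===== Notes on version B (the rewrite author's own statement) =====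
-- stated objective: alternative
-- what changed: B replaces A's two staged slicing passes (chunk into fours, then chunk the rows into fours) by a single pass over the flat padded list with row/matrix/matrices accumulators, and pads with one computed extend instead of a while loop.
import Mathlib
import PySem

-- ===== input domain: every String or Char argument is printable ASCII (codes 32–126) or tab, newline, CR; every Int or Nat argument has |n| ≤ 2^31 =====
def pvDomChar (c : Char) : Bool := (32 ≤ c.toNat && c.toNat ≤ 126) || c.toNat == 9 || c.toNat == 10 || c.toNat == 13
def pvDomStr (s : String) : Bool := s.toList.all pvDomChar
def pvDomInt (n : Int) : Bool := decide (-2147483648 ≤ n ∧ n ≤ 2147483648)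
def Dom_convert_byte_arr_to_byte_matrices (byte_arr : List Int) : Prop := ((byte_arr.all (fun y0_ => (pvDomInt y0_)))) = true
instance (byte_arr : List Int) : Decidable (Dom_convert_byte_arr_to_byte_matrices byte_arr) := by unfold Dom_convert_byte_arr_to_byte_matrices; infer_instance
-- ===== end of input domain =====

-- B pads with one computed extend and then makes a SINGLE pass over the flat list with
-- row/matrix/matrices accumulators instead of A's two staged slicing passes (alternative).
-- Both the Python A and the Python B mutate the argument list in place by padding it with
-- zeros; the equivalence proved here is about the RETURN value (the mutation is identical).

-- ===== PORT A =====
-- while len(byte_arr) % 16 != 0: byte_arr.append(0)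
-- (the loop appends at most 15 zeros, so fuel 16 only makes the same loop structurally total)
def pvPadLoop : Nat → List Int → List Int
  | 0, xs => xs
  | n + 1, xs => if xs.length % 16 = 0 then xs else pvPadLoop n (xs ++ [0])

def pvPadA (xs : List Int) : List Int := pvPadLoop 16 xs

-- def to_chunks_of_four(arr): return [arr[i:i+4] for i in range(0, len(arr), 4)]
def pvToChunksOfFour {α : Type} (arr : List α) : List (List α) :=
  (PySem.List.pyRange 0 (arr.length : Int) 4).map
    (fun i => PySem.List.slice arr (some i) (some (i + 4)))

def convert_byte_arr_to_byte_matrices (byte_arr : List Int) : List (List (List Int)) :=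
  let padded := pvPadA byte_arr
  let matrix := pvToChunksOfFour padded
  let matrices := pvToChunksOfFour matrix
  matrices

-- ===== PORT B =====
-- one step of B's for-loop: push x into the current row; on a full row push it into the
-- current matrix; on a full matrix push it into the result
def pvStepB (s : List (List (List Int)) × List (List Int) × List Int) (x : Int) :
    List (List (List Int)) × List (List Int) × List Int :=
  let row := s.2.2 ++ [x]
  if row.length = 4 then
    let matrix := s.2.1 ++ [row]
    if matrix.length = 4 then (s.1 ++ [matrix], [], [])
    else (s.1, matrix, [])
  else (s.1, s.2.1, row)

def convert_byte_arr_to_byte_matrices_alt (byte_arr : List Int) : List (List (List Int)) :=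
  let padded := byte_arr ++ List.replicate (PySem.Int.mod (-(byte_arr.length : Int)) 16).toNat 0
  (padded.foldl pvStepB ([], [], [])).1

-- ===== PRECONDITION & SPEC =====
def Spec_convert_byte_arr_to_byte_matrices (byte_arr : List Int) (out : List (List (List Int))) : Prop := out = convert_byte_arr_to_byte_matrices_alt byte_arr
instance (byte_arr : List Int) (out : List (List (List Int))) : Decidable (Spec_convert_byte_arr_to_byte_matrices byte_arr out) := by unfold Spec_convert_byte_arr_to_byte_matrices; infer_instance

-- ===== CLAIM (what is proved, stated in full; the proofs are below) =====
def Claim_equal_convert_byte_arr_to_byte_matrices : Prop := ∀ (byte_arr : List Int), Dom_convert_byte_arr_to_byte_matrices byte_arr → Spec_convert_byte_arr_to_byte_matrices byte_arr (convert_byte_arr_to_byte_matrices byte_arr)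

-- ===== LEMMAS AND PROOFS =====

-- A's while loop pads with exactly (16 - len % 16) % 16 zeros.
theorem pvPadLoop_eq (n : Nat) (xs : List Int) (hn : (16 - xs.length % 16) % 16 ≤ n) :
    pvPadLoop n xs = xs ++ List.replicate ((16 - xs.length % 16) % 16) 0 := by
  induction n generalizing xs with
  | zero =>
    have : (16 - xs.length % 16) % 16 = 0 := by omega
    simp [pvPadLoop, this]
  | succ n ih =>
    rw [pvPadLoop]
    split_ifs with h
    · have : (16 - xs.length % 16) % 16 = 0 := by omega
      simp [this]
    · rw [ih (xs ++ [0]) (by simp [List.length_append]; omega)]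
      have h1 : (16 - (xs ++ [0]).length % 16) % 16 + 1 = (16 - xs.length % 16) % 16 := by
        simp [List.length_append]; omega
      rw [List.append_assoc, ← h1]
      simp [List.replicate_succ]

theorem pvPadA_eq (xs : List Int) :
    pvPadA xs = xs ++ List.replicate ((16 - xs.length % 16) % 16) 0 := by
  exact pvPadLoop_eq 16 xs (by omega)

-- B's computed pad count equals A's.
theorem pvPadCount_eq (n : Nat) :
    (PySem.Int.mod (-(n : Int)) 16).toNat = (16 - n % 16) % 16 := by
  rw [PySem.Int.mod_eq_emod_of_pos (by norm_num)]
  omega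

theorem pvSliceNat {α : Type} (p : List α) (a : Nat) :
    PySem.List.slice p (some (a : Int)) (some ((a : Int) + 4)) = (p.drop a).take 4 := by
  have h := PySem.List.slice_natCast_add p a 4
  norm_num at h
  exact h

-- structural recursion view of chunking-by-four
def pvChunksRec {α : Type} : List α → List (List α)
  | a :: b :: c :: d :: l => [a, b, c, d] :: pvChunksRec l
  | [] => []
  | l => [l]

theorem pvChunks4 {α : Type} (p : List α) (m : Nat) (h : p.length = 4 * m) :
    pvToChunksOfFour p = (List.range m).map (fun i => (p.drop (4 * i)).take 4) := by
  unfold pvToChunksOfFour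
  rw [PySem.List.pyRange_of_pos 0 _ (by norm_num : (0:Int) < 4), h]
  have hc : (if (0:Int) < ((4*m : Nat) : Int) then ((((4*m : Nat) : Int) - 0 + 4 - 1)/4).toNat else 0) = m := by
    split_ifs with h0 <;> omega
  rw [hc, List.map_map]
  apply List.map_congr_left
  intro i hi
  simp only [Function.comp_apply]
  have e1 : (0:Int) + 4 * (i : Int) = ((4*i : Nat) : Int) := by push_cast; ring
  rw [e1, pvSliceNat]

-- pvToChunksOfFour agrees with the recursive chunking on 4-aligned lists
theorem pvChunksRec_eq {α : Type} (m : Nat) (p : List α) (h : p.length = 4 * m) :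
    pvToChunksOfFour p = pvChunksRec p := by
  induction m generalizing p with
  | zero =>
    match p, h with
    | [], _ => simp [pvToChunksOfFour, pvChunksRec, PySem.List.pyRange]
  | succ m ih =>
    match p, h with
    | a :: b :: c :: d :: q, h =>
      have hq : q.length = 4 * m := by simp at h; omega
      rw [pvChunks4 _ (m+1) h]
      show _ = [a, b, c, d] :: pvChunksRec q
      simp only [List.range_succ_eq_map, List.map_cons, List.map_map]
      congr 1
      · rw [← ih q hq, pvChunks4 q m hq]
        apply List.map_congr_left
        intro i hi
        simp only [Function.comp_apply]
        congr 1

theorem pvChunksRec_len {α : Type} (m : Nat) (p : List α) (h : p.length = 4 * m) :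
    (pvChunksRec p).length = m := by
  induction m generalizing p with
  | zero => match p, h with
    | [], _ => rfl
  | succ m ih =>
    match p, h with
    | a :: b :: c :: d :: q, h =>
      have hq : q.length = 4 * m := by simp at h; omega
      show ([a, b, c, d] :: pvChunksRec q).length = m + 1
      simp [ih q hq]

-- B's fold consumes 16 elements and emits exactly one 4x4 matrix
theorem pvFold16 (ms : List (List (List Int))) (a0 a1 a2 a3 a4 a5 a6 a7 a8 a9 a10 a11 a12 a13 a14 a15 : Int) (rest : List Int) :
    List.foldl pvStepB (ms, [], []) (a0::a1::a2::a3::a4::a5::a6::a7::a8::a9::a10::a11::a12::a13::a14::a15::rest)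
      = List.foldl pvStepB (ms ++ [[[a0,a1,a2,a3],[a4,a5,a6,a7],[a8,a9,a10,a11],[a12,a13,a14,a15]]], [], []) rest := by
  simp [List.foldl_cons, pvStepB]

-- main invariant: on a 16-aligned list the fold appends the 4x4 matrices to ms
theorem pvFoldB_eq (k : Nat) (p : List Int) (ms : List (List (List Int)))
    (h : p.length = 16 * k) :
    (List.foldl pvStepB (ms, [], []) p).1 = ms ++ pvChunksRec (pvChunksRec p) := by
  induction k generalizing p ms with
  | zero =>
    match p, h with
    | [], _ => simp [pvChunksRec]
  | succ k ih =>
    match p, h with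
    | a0::a1::a2::a3::a4::a5::a6::a7::a8::a9::a10::a11::a12::a13::a14::a15::q, h =>
      have hq : q.length = 16 * k := by simp at h; omega
      rw [pvFold16, ih q _ hq]
      have e : pvChunksRec (pvChunksRec (a0::a1::a2::a3::a4::a5::a6::a7::a8::a9::a10::a11::a12::a13::a14::a15::q))
          = [[a0,a1,a2,a3],[a4,a5,a6,a7],[a8,a9,a10,a11],[a12,a13,a14,a15]] :: pvChunksRec (pvChunksRec q) := by
        simp [pvChunksRec]
      rw [e, List.append_assoc]
      rfl

-- ===== VERDICT (by name: the statement is the Claim_ definition above) =====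
theorem convert_byte_arr_to_byte_matrices_spec : Claim_equal_convert_byte_arr_to_byte_matrices := by
  intro xs _
  unfold Spec_convert_byte_arr_to_byte_matrices
  unfold convert_byte_arr_to_byte_matrices convert_byte_arr_to_byte_matrices_alt
  simp only
  rw [pvPadA_eq, pvPadCount_eq]
  set p := xs ++ List.replicate ((16 - xs.length % 16) % 16) 0 with hp
  have hlen : p.length = 16 * (p.length / 16) := by
    simp [hp, List.length_append]; omega
  rw [pvFoldB_eq (p.length / 16) p [] hlen]
  rw [pvChunksRec_eq (4 * (p.length / 16)) p (by omega)]
  rw [pvChunksRec_eq (p.length / 16) (pvChunksRec p) (pvChunksRec_len (4 * (p.length / 16)) p (by omega))]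
  simp
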